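-- pv_equiv track=rewrite | github.com/lmmsoft/blog_to_jekyll | convert.py | remove_duplicated_blogs
-- ===== SOURCE A (Python) =====
-- def remove_duplicated_blogs(blog_list):
--     blog_dict = {}
--     for blog in blog_list:
--         title = blog['title']
--         if title in blog_dict:
--             # 我的重复博客都是百度导入的
--             # moveForm 为 baidu 或 baidu_qing
--             # baidu_qing 的html相对更简洁，所以重复的用baidu_qing替代baidu的
--             if blog['moveForm'] == "baidu_qing":
--                 blog_dict[title] = blog
--         else:
--             blog_dict[title] = blog
--
--     return blog_dict
-- ===== SOURCE B (Python) =====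
-- def remove_duplicated_blogs(blog_list):
--     # Stage 1: group the blogs by title (titles keep first-occurrence order).
--     groups = {}
--     for blog in blog_list:
--         t = blog['title']
--         groups[t] = groups.get(t, []) + [blog]
--     # Stage 2: per title pick the winner: the last baidu_qing version,
--     # or the first occurrence if the group has none.
--     result = {}
--     for title, blogs in groups.items():
--         chosen = blogs[0]
--         for b in blogs:
--             if b.get('moveForm') == 'baidu_qing':
--                 chosen = b
--         result[title] = chosen
--     return result
-- ===== Notes on version B (the rewrite author's own statement) =====
-- stated objective: alternative
-- what changed: Replaces A's single branching membership-test pass by a group-by-title stage followed by a per-group selection stage (last baidu_qing version, else the first occurrence) that rebuilds the dict from the groups.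
import Mathlib
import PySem

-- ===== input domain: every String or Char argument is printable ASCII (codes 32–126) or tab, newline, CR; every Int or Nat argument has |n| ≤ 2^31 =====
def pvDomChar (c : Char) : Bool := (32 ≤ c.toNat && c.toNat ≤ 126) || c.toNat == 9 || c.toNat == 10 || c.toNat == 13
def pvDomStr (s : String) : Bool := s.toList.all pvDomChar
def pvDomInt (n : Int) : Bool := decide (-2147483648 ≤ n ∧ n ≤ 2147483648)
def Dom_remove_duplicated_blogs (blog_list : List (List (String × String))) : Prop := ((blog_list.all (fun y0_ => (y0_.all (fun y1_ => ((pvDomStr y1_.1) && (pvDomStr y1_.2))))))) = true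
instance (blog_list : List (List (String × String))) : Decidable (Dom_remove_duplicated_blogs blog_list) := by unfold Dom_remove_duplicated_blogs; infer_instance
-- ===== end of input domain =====

-- B replaces A's single branching pass by a group-by-title stage plus a per-group selection
-- stage (last baidu_qing version, else the first occurrence); a different decomposition, not faster.

-- ===== PORT A =====
-- loop body of A: if title in dict then (overwrite only when moveForm == "baidu_qing") else insert
def pvStepA (blog_dict : PySem.Dict String (List (String × String)))
    (blog : List (String × String)) : PySem.Dict String (List (String × String)) :=
  let title := (PySem.Dict.mk blog).getD "title" ""          -- blog['title']; KeyError excluded by Pre_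
  if blog_dict.contains title then
    if (PySem.Dict.mk blog).getD "moveForm" "" == "baidu_qing" then  -- blog['moveForm']; KeyError excluded by Pre_
      blog_dict.insert title blog
    else blog_dict
  else blog_dict.insert title blog

def remove_duplicated_blogs (blog_list : List (List (String × String))) : List (String × List (String × String)) :=
  (blog_list.foldl pvStepA (PySem.Dict.empty : PySem.Dict String (List (String × String)))).items

-- ===== PORT B =====
-- stage 1 body: groups[t] = groups.get(t, []) + [blog]
def pvGroupStep (g : PySem.Dict String (List (List (String × String))))
    (blog : List (String × String)) : PySem.Dict String (List (List (String × String))) :=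
  let t := (PySem.Dict.mk blog).getD "title" ""
  g.insert t (g.getD t [] ++ [blog])

-- stage 2 inner loop: chosen = blogs[0]; for b in blogs: if b.get('moveForm') == 'baidu_qing': chosen = b
-- (blogs[0] ported as headD []: every group built by stage 1 is nonempty)
def pvChoose (blogs : List (List (String × String))) : List (String × String) :=
  blogs.foldl
    (fun chosen b => if (PySem.Dict.mk b).get? "moveForm" == some "baidu_qing" then b else chosen)
    (blogs.headD [])

def remove_duplicated_blogs_alt (blog_list : List (List (String × String))) : List (String × List (String × String)) :=
  let groups := blog_list.foldl pvGroupStep (PySem.Dict.empty : PySem.Dict String (List (List (String × String))))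
  (groups.items.foldl
    (fun result p => result.insert p.1 (pvChoose p.2))
    (PySem.Dict.empty : PySem.Dict String (List (String × String)))).items

-- ===== PRECONDITION & SPEC =====
-- Pre_ = exactly the inputs on which Python A returns: every blog has a 'title' key, and every blog
-- whose title already occurred earlier also has a 'moveForm' key (otherwise A raises KeyError).
def Pre_remove_duplicated_blogs (blog_list : List (List (String × String))) : Prop :=
  ∀ i < blog_list.length,
    (PySem.Dict.mk (blog_list.getD i [])).contains "title" = true ∧
    ((∃ j < i, (PySem.Dict.mk (blog_list.getD j [])).getD "title" "" =
               (PySem.Dict.mk (blog_list.getD i [])).getD "title" "") →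
      (PySem.Dict.mk (blog_list.getD i [])).contains "moveForm" = true)
instance (blog_list : List (List (String × String))) : Decidable (Pre_remove_duplicated_blogs blog_list) := by
  unfold Pre_remove_duplicated_blogs; infer_instance

def pvWitness_remove_duplicated_blogs : (List (List (String × String))) :=
  ([[("title", "a"), ("moveForm", "baidu")], [("title", "a"), ("moveForm", "baidu_qing")], [("title", "b")]])

def Spec_remove_duplicated_blogs (blog_list : List (List (String × String))) (out : List (String × List (String × String))) : Prop := out = remove_duplicated_blogs_alt blog_list
instance (blog_list : List (List (String × String))) (out : List (String × List (String × String))) : Decidable (Spec_remove_duplicated_blogs blog_list out) := by unfold Spec_remove_duplicated_blogs; infer_instance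

-- ===== CLAIM (what is proved, stated in full; the proofs are below) =====
def Claim_equal_remove_duplicated_blogs : Prop := ∀ (blog_list : List (List (String × String))), Dom_remove_duplicated_blogs blog_list → Pre_remove_duplicated_blogs blog_list → Spec_remove_duplicated_blogs blog_list (remove_duplicated_blogs blog_list)

-- ===== LEMMAS AND PROOFS =====

-- abbreviations used only by the proofs
def pvTitle (b : List (String × String)) : String := (PySem.Dict.mk b).getD "title" ""
def pvQing (b : List (String × String)) : Bool :=
  (PySem.Dict.mk b).get? "moveForm" == some "baidu_qing"
def pvPick (p : String × List (List (String × String))) : String × List (String × String) :=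
  (p.1, pvChoose p.2)

lemma choose_singleton (b : List (String × String)) : pvChoose [b] = b := by
  unfold pvChoose; simp

lemma choose_append_qing (bs : List (List (String × String))) (b : List (String × String))
    (hq : pvQing b = true) : pvChoose (bs ++ [b]) = b := by
  unfold pvChoose
  rw [List.foldl_append]
  simp only [List.foldl_cons, List.foldl_nil]
  simp [pvQing] at hq
  simp [hq]

lemma choose_append_not (bs : List (List (String × String))) (b : List (String × String))
    (hq : pvQing b = false) (hne : bs ≠ []) : pvChoose (bs ++ [b]) = pvChoose bs := by
  unfold pvChoose
  rw [List.foldl_append]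
  simp only [List.foldl_cons, List.foldl_nil]
  simp [pvQing] at hq
  simp [hq]
  cases bs with
  | nil => exact absurd rfl hne
  | cons x xs => rfl

lemma qing_eq_getD (b : List (String × String)) :
    pvQing b = ((PySem.Dict.mk b).getD "moveForm" "" == "baidu_qing") := by
  unfold pvQing
  rw [PySem.Dict.getD_eq_get?_getD]
  cases h : (PySem.Dict.mk b).get? "moveForm" <;> simp

-- rfl views of the two step functions (their 'let title := …' unfolded)
lemma stepA_eq (d : PySem.Dict String (List (String × String))) (b : List (String × String)) :
    pvStepA d b =
      if d.contains (pvTitle b) then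
        if (PySem.Dict.mk b).getD "moveForm" "" == "baidu_qing" then d.insert (pvTitle b) b else d
      else d.insert (pvTitle b) b := rfl

lemma groupStep_eq (g : PySem.Dict String (List (List (String × String)))) (b : List (String × String)) :
    pvGroupStep g b = g.insert (pvTitle b) (g.getD (pvTitle b) [] ++ [b]) := rfl

-- keys agree when A's dict is the pvPick image of the groups dict
lemma keys_of_items_map (d : PySem.Dict String (List (String × String)))
    (g : PySem.Dict String (List (List (String × String))))
    (h : d.items = g.items.map pvPick) : d.keys = g.keys := by
  simp only [PySem.Dict.keys, h, List.map_map]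
  rfl

-- the heart: A's single pass equals pvPick mapped over the grouping pass, for every linked pair of accumulators
lemma one_pass_eq_group_pick (l : List (List (String × String))) :
    ∀ (d : PySem.Dict String (List (String × String)))
      (g : PySem.Dict String (List (List (String × String)))),
      g.keys.Nodup → (∀ p ∈ g.items, p.2 ≠ []) →
      d.items = g.items.map pvPick →
      (l.foldl pvStepA d).items = (l.foldl pvGroupStep g).items.map pvPick := by
  induction l with
  | nil => intro d g _ _ h; simpa using h
  | cons b l ih =>
    intro d g hnd hne h
    simp only [List.foldl_cons]
    have hkeys : d.keys = g.keys := keys_of_items_map d g h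
    have hcont : ∀ k, d.contains k = g.contains k := by
      intro k
      rw [PySem.Dict.contains_eq_decide_mem_keys, PySem.Dict.contains_eq_decide_mem_keys, hkeys]
    have hndg : (pvGroupStep g b).keys.Nodup := by
      unfold pvGroupStep; exact PySem.Dict.nodup_keys_insert _ _ _ hnd
    have hneg : ∀ p ∈ (pvGroupStep g b).items, p.2 ≠ [] := by
      unfold pvGroupStep
      intro p hp
      rcases (PySem.Dict.mem_items_insert _ _ _ _).mp hp with hp | ⟨hp, _⟩
      · subst hp; simp
      · exact hne p hp
    apply ih _ _ hndg hneg
    -- step: (pvStepA d b).items = (pvGroupStep g b).items.map pvPick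
    rw [stepA_eq, groupStep_eq]
    by_cases hc : g.contains (pvTitle b) = true
    · -- title already present
      have hcd : d.contains (pvTitle b) = true := by rw [hcont]; exact hc
      have hold : (pvTitle b, g.getD (pvTitle b) []) ∈ g.items := by
        have : ∃ v, g.get? (pvTitle b) = some v := by
          rcases hv : g.get? (pvTitle b) with _ | v
          · rw [PySem.Dict.contains_eq_isSome_get?, hv] at hc; simp at hc
          · exact ⟨v, rfl⟩
        rcases this with ⟨v, hv⟩
        have := PySem.Dict.mem_items_of_get?_eq_some g hv
        rwa [PySem.Dict.getD_of_get?_eq_some g [] hv]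
      have holdne : g.getD (pvTitle b) [] ≠ [] := hne _ hold
      rw [PySem.Dict.items_insert_of_contains g _ hc]
      by_cases hq : pvQing b = true
      · -- overwrite with the qing blog
        have hq' : ((PySem.Dict.mk b).getD "moveForm" "" == "baidu_qing") = true := by
          rw [← qing_eq_getD]; exact hq
        rw [if_pos hcd, if_pos hq', PySem.Dict.items_insert_of_contains d _ hcd, h,
          List.map_map, List.map_map]
        apply List.map_congr_left
        intro p hp
        by_cases hpt : p.1 = pvTitle b
        · simp [Function.comp, pvPick, hpt, choose_append_qing _ b hq]
        · simp [Function.comp, pvPick, hpt]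
      · -- keep the existing entry
        have hq' : ((PySem.Dict.mk b).getD "moveForm" "" == "baidu_qing") = false := by
          rw [← qing_eq_getD]; simpa using hq
        rw [if_pos hcd, if_neg (by simp [hq']), h, List.map_map]
        apply List.map_congr_left
        intro p hp
        by_cases hpt : p.1 = pvTitle b
        · have hp2 : p.2 = g.getD (pvTitle b) [] := by
            have hp' : (p.1, p.2) ∈ g.items := by rw [Prod.mk.eta]; exact hp
            rw [← hpt]
            exact (PySem.Dict.getD_of_mem_items g hp' hnd []).symm
          simp [Function.comp, pvPick, hpt, hp2,
            choose_append_not _ b (by simpa using hq) (hp2 ▸ hne p hp)]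
        · simp [Function.comp, pvPick, hpt]
    · -- fresh title: both sides append
      have hcd : d.contains (pvTitle b) = false := by rw [hcont]; simpa using hc
      have hgd : g.getD (pvTitle b) [] = [] :=
        PySem.Dict.getD_of_not_contains g [] (by simpa using hc)
      rw [if_neg (by simp [hcd]),
        PySem.Dict.items_insert_of_not_contains d _ hcd,
        PySem.Dict.items_insert_of_not_contains g _ (by simpa using hc), h]
      simp [pvPick, hgd, choose_singleton]

-- B's second stage over distinct fresh keys is exactly the pvPick map
lemma alt_eq_map_pick (l : List (List (String × String))) :
    remove_duplicated_blogs_alt l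
      = (l.foldl pvGroupStep PySem.Dict.empty).items.map pvPick := by
  unfold remove_duplicated_blogs_alt
  have hg : l.foldl pvGroupStep PySem.Dict.empty
      = l.foldl (fun d x => d.insert (pvTitle x) (d.getD (pvTitle x) [] ++ [x])) PySem.Dict.empty := rfl
  have hnd : (l.foldl pvGroupStep PySem.Dict.empty).keys.Nodup := by
    rw [hg]
    exact PySem.Dict.nodup_keys_foldl_insert_key l pvTitle _ _ PySem.Dict.nodup_keys_empty
  have hmapnd : (((l.foldl pvGroupStep PySem.Dict.empty).items).map (fun p => p.1)).Nodup := hnd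
  show (List.foldl (fun result p => result.insert p.1 (pvChoose p.2)) PySem.Dict.empty
      (l.foldl pvGroupStep PySem.Dict.empty).items).items = _
  rw [PySem.Dict.items_foldl_insert_fresh (l.foldl pvGroupStep PySem.Dict.empty).items
    (fun p => p.1) (fun p => pvChoose p.2) PySem.Dict.empty
    (by intro a _; exact PySem.Dict.contains_empty _) hmapnd]
  simp [pvPick, PySem.Dict.empty]

-- ===== VERDICT (by name: the statement is the Claim_ definition above) =====
theorem remove_duplicated_blogs_spec : Claim_equal_remove_duplicated_blogs := by
  intro blog_list _ _
  unfold Spec_remove_duplicated_blogs remove_duplicated_blogs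
  rw [alt_eq_map_pick]
  exact one_pass_eq_group_pick blog_list PySem.Dict.empty PySem.Dict.empty
    PySem.Dict.nodup_keys_empty (by intro p hp; simp [PySem.Dict.empty] at hp) rfl
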